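-- pv_equiv track=rewrite | github.com/gpwi970725/Programming_Practice | Demotest-1.py | solution
-- ===== SOURCE A (Python) =====
-- def solution(v):
--     x, y = list(), list()
--
--     for i in range(3):
--         temp = v[i][0]
--         x.remove(temp) if temp in x else x.append(temp)
--         temp = v[i][1]
--         y.remove(temp) if temp in y else y.append(temp)
--
--     return x+y
-- ===== SOURCE B (Python) =====
-- def solution(v):
--     xs = [v[i][0] for i in range(3)]
--     ys = [v[i][1] for i in range(3)]
--
--     def odd_survivors(vals):
--         counts = {}
--         for t in vals:
--             counts[t] = counts.get(t, 0) + 1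
--         return [val for val, c in counts.items() if c % 2]
--
--     return odd_survivors(xs) + odd_survivors(ys)
-- ===== Notes on version B (the rewrite author's own statement) =====
-- stated objective: simpler
-- what changed: Replaces A's interleaved toggle (membership test + remove/append per element) with a count-then-filter decomposition: gather the three x and y coordinates, build a frequency table once, and keep the values with odd count in first-occurrence order.
import Mathlib
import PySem

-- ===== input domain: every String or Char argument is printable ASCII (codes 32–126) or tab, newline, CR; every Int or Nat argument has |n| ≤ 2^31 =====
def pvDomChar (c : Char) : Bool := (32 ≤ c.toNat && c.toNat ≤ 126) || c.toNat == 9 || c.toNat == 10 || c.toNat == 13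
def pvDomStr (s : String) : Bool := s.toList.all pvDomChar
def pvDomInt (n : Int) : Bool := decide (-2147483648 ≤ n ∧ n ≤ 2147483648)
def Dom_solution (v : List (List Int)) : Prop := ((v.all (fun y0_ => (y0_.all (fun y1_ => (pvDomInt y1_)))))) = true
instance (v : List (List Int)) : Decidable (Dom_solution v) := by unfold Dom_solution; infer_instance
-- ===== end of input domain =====

-- B replaces A's interleaved membership-toggle with a count-then-filter pass (simpler decomposition, same O(1) cost).


-- ===== PORT A =====
-- 'x.remove(t) if t in x else x.append(t)'
def pvTog (x : List Int) (t : Int) : List Int :=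
  if x.contains t then (PySem.List.remove? x t).getD x else x ++ [t]

def solution (v : List (List Int)) : List Int :=
  let r := (PySem.List.pyRange 0 3 1).foldl
    (fun (xy : List Int × List Int) (i : Int) =>
      let row := (PySem.List.pyGet? v i).getD []   -- v[i]; none (IndexError) excluded by Pre_
      let x := pvTog xy.1 ((PySem.List.pyGet? row 0).getD 0)
      let y := pvTog xy.2 ((PySem.List.pyGet? row 1).getD 0)
      (x, y))
    ([], [])
  r.1 ++ r.2

-- ===== PORT B =====
def pvOddSurvivors (vals : List Int) : List Int :=
  let counts := vals.foldl (fun d t => d.insert t (d.getD t 0 + 1)) PySem.Dict.empty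
  (counts.items.filter (fun p => ¬ p.2 % 2 = 0)).map (·.1)

def solution_alt (v : List (List Int)) : List Int :=
  let xs := (PySem.List.pyRange 0 3 1).map (fun i => ((PySem.List.pyGet? ((PySem.List.pyGet? v i).getD [])) 0).getD 0)
  let ys := (PySem.List.pyRange 0 3 1).map (fun i => ((PySem.List.pyGet? ((PySem.List.pyGet? v i).getD [])) 1).getD 0)
  pvOddSurvivors xs ++ pvOddSurvivors ys

-- ===== PRECONDITION & SPEC =====
-- A indexes v[0..2] and each of those rows at positions 0 and 1: shorter inputs raise IndexError.
def Pre_solution (v : List (List Int)) : Prop :=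
  3 ≤ v.length ∧ ∀ r ∈ v.take 3, 2 ≤ r.length
instance (v : List (List Int)) : Decidable (Pre_solution v) := by unfold Pre_solution; infer_instance
def pvWitness_solution : List (List Int) := [[0, 1], [2, 1], [2, 3]]
def Spec_solution (v : List (List Int)) (out : List Int) : Prop := out = solution_alt v
instance (v : List (List Int)) (out : List Int) : Decidable (Spec_solution v out) := by unfold Spec_solution; infer_instance

-- ===== CLAIM (what is proved, stated in full; the proofs are below) =====
def Claim_equal_solution : Prop := ∀ (v : List (List Int)), Dom_solution v → Pre_solution v → Spec_solution v (solution v)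

-- ===== LEMMAS AND PROOFS =====
theorem pvTog_key (a b c : Int) :
    pvTog (pvTog (pvTog [] a) b) c = pvOddSurvivors [a, b, c] := by
  by_cases hab : a = b <;> by_cases hac : a = c <;> by_cases hbc : b = c <;>
    simp_all [pvTog, pvOddSurvivors, PySem.List.remove?, PySem.Dict.insert,
      PySem.Dict.getD, PySem.Dict.get?, PySem.Dict.empty, PySem.Dict.items,
      PySem.Dict.contains, List.filter, List.foldl, List.idxOf?, List.findIdx?,
      List.findIdx?.go, List.eraseIdx] <;>
    split_ifs <;> simp_all <;> omega

-- ===== VERDICT (by name: the statement is the Claim_ definition above) =====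
theorem solution_spec : Claim_equal_solution := by
  intro v _ hpre
  obtain ⟨hlen, hrows⟩ := hpre
  match v, hlen with
  | r0 :: r1 :: r2 :: rest, _ =>
    have h0 := hrows r0 (by simp)
    have h1 := hrows r1 (by simp)
    have h2 := hrows r2 (by simp)
    match r0, h0, r1, h1, r2, h2 with
    | a0 :: a1 :: _, _, b0 :: b1 :: _, _, c0 :: c1 :: _, _ =>
      show _ = solution_alt _
      have hr : PySem.List.pyRange 0 3 1 = [0, 1, 2] := by decide
      have pg1 : ∀ {α : Type} (a b : α) (l : List α),
          PySem.List.pyGet? (a :: b :: l) 1 = some b := by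
        intro α a b l
        rw [show ((1 : Int)) = ((1 : Nat) : Int) from rfl, PySem.List.pyGet?_natCast]
        rfl
      have pg2 : ∀ {α : Type} (a b c : α) (l : List α),
          PySem.List.pyGet? (a :: b :: c :: l) 2 = some c := by
        intro α a b c l
        rw [show ((2 : Int)) = ((2 : Nat) : Int) from rfl, PySem.List.pyGet?_natCast]
        rfl
      simp only [solution, solution_alt, hr, List.foldl, List.map,
        PySem.List.pyGet?_zero_cons, pg1, pg2, Option.getD_some, pvTog_key]
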